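-- pv_equiv track=rewrite | github.com/philornot/GeneratorPlanuLekcji | src/genetic/genetic_operators.py | _find_lessons_near_gaps
-- ===== SOURCE A (Python) =====
-- from typing import List, Tuple, Optional, Any
--
-- def _find_lessons_near_gaps(individual: List, empty_slots: List[Tuple]) -> List[int]:
--     """Znajduje lekcje sąsiadujące z dziurami w planie."""
--     nearby_lessons = []
--
--     for day, hour, class_group in empty_slots:
--         for i, lesson in enumerate(individual):
--             # Dodane zabezpieczenie przed None
--             if lesson is None:
--                 continue
--
--             if (lesson[2] == class_group and  # ta sama klasa
--                     lesson[0] == day and  # ten sam dzień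
--                     abs(lesson[1] - hour) <= 1):  # sąsiednia godzina
--                 nearby_lessons.append(i)
--
--     return nearby_lessons
-- ===== SOURCE B (Python) =====
-- def _find_lessons_near_gaps(individual, empty_slots):
--     """Znajduje lekcje sasiadujace z dziurami w planie."""
--     # Index lessons once by (day, class_group); per gap scan only that bucket.
--     buckets = {}
--     for i, lesson in enumerate(individual):
--         if lesson is not None:
--             buckets.setdefault((lesson[0], lesson[2]), []).append((lesson[1], i))
--     nearby_lessons = []
--     for day, hour, class_group in empty_slots:
--         for h, i in buckets.get((day, class_group), []):
--             if abs(h - hour) <= 1: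
--                 nearby_lessons.append(i)
--     return nearby_lessons
-- ===== Notes on version B (the rewrite author's own statement) =====
-- stated objective: faster
-- what changed: B builds a dict indexing the (hour, index) pairs of each lesson by (day, class_group) in one pass and, per empty slot, filters only that bucket for adjacent hours, instead of A's rescan of the whole individual list for every slot.
import Mathlib
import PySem

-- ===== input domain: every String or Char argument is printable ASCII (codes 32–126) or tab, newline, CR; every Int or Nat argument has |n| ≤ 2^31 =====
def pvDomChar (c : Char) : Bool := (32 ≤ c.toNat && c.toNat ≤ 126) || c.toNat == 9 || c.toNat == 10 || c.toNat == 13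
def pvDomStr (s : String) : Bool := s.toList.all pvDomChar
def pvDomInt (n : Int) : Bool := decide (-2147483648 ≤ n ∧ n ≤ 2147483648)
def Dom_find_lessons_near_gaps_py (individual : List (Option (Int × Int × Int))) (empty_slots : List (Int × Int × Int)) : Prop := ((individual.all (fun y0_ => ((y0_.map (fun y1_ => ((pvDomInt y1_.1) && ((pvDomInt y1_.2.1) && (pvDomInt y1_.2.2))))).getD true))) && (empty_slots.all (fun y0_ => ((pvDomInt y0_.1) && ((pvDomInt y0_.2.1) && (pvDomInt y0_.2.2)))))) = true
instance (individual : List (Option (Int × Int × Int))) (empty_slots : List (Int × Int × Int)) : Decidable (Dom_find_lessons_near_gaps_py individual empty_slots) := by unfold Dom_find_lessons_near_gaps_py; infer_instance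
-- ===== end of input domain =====

-- B indexes the lessons once in a dict keyed by (day, class_group) and scans only the
-- matching bucket per empty slot, instead of A's rescan of all lessons for every slot.
-- Objective: faster (removes the per-slot full scan); return value identical.

-- ===== PORT A =====
def find_lessons_near_gaps_py (individual : List (Option (Int × Int × Int))) (empty_slots : List (Int × Int × Int)) : List Int :=
  empty_slots.foldl (fun nearby s =>
    (PySem.List.enumerate individual).foldl (fun nearby p =>
      match p.2 with
      | none => nearby
      | some lesson =>
        if lesson.2.2 = s.2.2 ∧ lesson.1 = s.1 ∧ |lesson.2.1 - s.2.1| ≤ 1 then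
          nearby ++ [p.1]
        else nearby) nearby) []

-- ===== PORT B =====
def find_lessons_near_gaps_py_alt (individual : List (Option (Int × Int × Int))) (empty_slots : List (Int × Int × Int)) : List Int :=
  let buckets : PySem.Dict (Int × Int) (List (Int × Int)) :=
    (PySem.List.enumerate individual).foldl (fun d p =>
      match p.2 with
      | none => d
      | some lesson => d.modify (lesson.1, lesson.2.2) [] (· ++ [(lesson.2.1, p.1)]))
      PySem.Dict.empty
  empty_slots.foldl (fun nearby s =>
    nearby ++ ((buckets.getD (s.1, s.2.2) []).filter
      (fun q => decide (|q.1 - s.2.1| ≤ 1))).map (·.2)) []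

-- ===== PRECONDITION & SPEC =====
def Spec_find_lessons_near_gaps_py (individual : List (Option (Int × Int × Int))) (empty_slots : List (Int × Int × Int)) (out : List Int) : Prop := out = find_lessons_near_gaps_py_alt individual empty_slots
instance (individual : List (Option (Int × Int × Int))) (empty_slots : List (Int × Int × Int)) (out : List Int) : Decidable (Spec_find_lessons_near_gaps_py individual empty_slots out) := by unfold Spec_find_lessons_near_gaps_py; infer_instance

-- ===== CLAIM (what is proved, stated in full; the proofs are below) =====
def Claim_equal_find_lessons_near_gaps_py : Prop := ∀ (individual : List (Option (Int × Int × Int))) (empty_slots : List (Int × Int × Int)), Dom_find_lessons_near_gaps_py individual empty_slots → Spec_find_lessons_near_gaps_py individual empty_slots (find_lessons_near_gaps_py individual empty_slots)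

-- ===== LEMMAS AND PROOFS =====

-- the lessons of l matching slot s, as A selects them (index only)
def pvSelA (day hour cg : Int) (l : List (Int × Option (Int × Int × Int))) : List Int :=
  l.filterMap (fun p => match p.2 with
    | none => none
    | some lesson =>
      if lesson.2.2 = cg ∧ lesson.1 = day ∧ |lesson.2.1 - hour| ≤ 1 then some p.1 else none)

-- the (hour, index) pairs of l that land in bucket (day, cg)
def pvPairs (day cg : Int) (l : List (Int × Option (Int × Int × Int))) : List (Int × Int) :=
  l.filterMap (fun p => match p.2 with
    | none => none
    | some lesson =>
      if (lesson.1, lesson.2.2) = (day, cg) then some (lesson.2.1, p.1) else none)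

theorem pv_innerA (day hour cg : Int) (l : List (Int × Option (Int × Int × Int))) :
    ∀ acc : List Int,
      l.foldl (fun nearby p =>
        match p.2 with
        | none => nearby
        | some lesson =>
          if lesson.2.2 = cg ∧ lesson.1 = day ∧ |lesson.2.1 - hour| ≤ 1 then
            nearby ++ [p.1]
          else nearby) acc = acc ++ pvSelA day hour cg l := by
  induction l with
  | nil => intro acc; simp [pvSelA]
  | cons p t ih =>
    obtain ⟨i, po⟩ := p
    cases po with
    | none => intro acc; simp [List.foldl_cons, ih, pvSelA]
    | some lesson =>
      intro acc
      by_cases hc : lesson.2.2 = cg ∧ lesson.1 = day ∧ |lesson.2.1 - hour| ≤ 1 <;>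
        simp [List.foldl_cons, hc, ih, pvSelA]

theorem pv_bucket (day cg : Int) (l : List (Int × Option (Int × Int × Int))) :
    ∀ d : PySem.Dict (Int × Int) (List (Int × Int)),
      (l.foldl (fun d p =>
        match p.2 with
        | none => d
        | some lesson => d.modify (lesson.1, lesson.2.2) [] (· ++ [(lesson.2.1, p.1)])) d).getD
          (day, cg) []
        = d.getD (day, cg) [] ++ pvPairs day cg l := by
  induction l with
  | nil => intro d; simp [pvPairs]
  | cons p t ih =>
    obtain ⟨i, po⟩ := p
    cases po with
    | none => intro d; simp [List.foldl_cons, ih, pvPairs]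
    | some lesson =>
      intro d
      by_cases hk : (lesson.1, lesson.2.2) = (day, cg)
      · rw [Prod.mk.injEq] at hk
        obtain ⟨h1, h2⟩ := hk
        subst h1; subst h2
        simp [List.foldl_cons, ih, pvPairs]
      · rw [Prod.mk.injEq] at hk
        have hk3 : ¬ (day = lesson.1 ∧ cg = lesson.2.2) := fun h => hk ⟨h.1.symm, h.2.symm⟩
        simp [List.foldl_cons, ih, pvPairs, PySem.Dict.getD_modify, hk, hk3]

theorem pv_sel_eq (day hour cg : Int) (l : List (Int × Option (Int × Int × Int))) :
    pvSelA day hour cg l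
      = ((pvPairs day cg l).filter (fun q => decide (|q.1 - hour| ≤ 1))).map (·.2) := by
  induction l with
  | nil => simp [pvSelA, pvPairs]
  | cons p t ih =>
    obtain ⟨i, po⟩ := p
    cases po with
    | none => simpa [pvSelA, pvPairs] using ih
    | some lesson =>
      by_cases hk : lesson.1 = day ∧ lesson.2.2 = cg
      · obtain ⟨h1, h2⟩ := hk
        subst h1; subst h2
        simp only [pvSelA, pvPairs] at ih ⊢
        by_cases hh : |lesson.2.1 - hour| ≤ 1 <;> simp [hh, ih]
      · have hk' : ¬ (lesson.2.2 = cg ∧ lesson.1 = day ∧ |lesson.2.1 - hour| ≤ 1) := by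
          intro h; exact hk ⟨h.2.1, h.1⟩
        simp only [pvSelA, pvPairs] at ih ⊢
        simp [hk, hk', ih]

-- ===== VERDICT (by name: the statement is the Claim_ definition above) =====
theorem find_lessons_near_gaps_py_spec : Claim_equal_find_lessons_near_gaps_py := by
  intro individual empty_slots _
  unfold Spec_find_lessons_near_gaps_py find_lessons_near_gaps_py find_lessons_near_gaps_py_alt
  have hb : ∀ s : Int × Int × Int,
      pvSelA s.1 s.2.1 s.2.2 (PySem.List.enumerate individual)
        = ((((PySem.List.enumerate individual).foldl (fun d p =>
            match p.2 with
            | none => d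
            | some lesson => d.modify (lesson.1, lesson.2.2) [] (· ++ [(lesson.2.1, p.1)]))
            PySem.Dict.empty).getD (s.1, s.2.2) []).filter
              (fun q => decide (|q.1 - s.2.1| ≤ 1))).map (·.2) := by
    intro s
    rw [pv_bucket s.1 s.2.2 _ PySem.Dict.empty, PySem.Dict.getD_empty]
    simpa using pv_sel_eq s.1 s.2.1 s.2.2 (PySem.List.enumerate individual)
  simp only [pv_innerA, hb]
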